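-- pv_equiv track=rewrite | github.com/TomerCohen95/tailorjob | backend/app/services/cv_comparator.py | _has_equivalent_education
-- ===== SOURCE A (Python) =====
-- from typing import Dict, Any, List, Set
--
-- def _has_equivalent_education(education: List[Dict[str, Any]]) -> bool:
--     """
--     Check if candidate has equivalent educational qualification
--     (Associates, technical degree, bootcamp, professional certification).
--
--     NOTE: This is for "equivalent DEGREE", not "equivalent experience".
--     """
--     equivalent_keywords = [
--         "associate", "a.s.", "a.a.",  # Associates degrees
--         "diploma", "certificate",  # Technical diplomas/certificates
--         "bootcamp", "coding bootcamp",  # Bootcamps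
--         "professional certificate",  # Professional certifications
--         "technical degree"  # Technical degrees
--     ]
--
--     for edu in education:
--         degree = (edu.get("degree") or "").lower()
--         institution = (edu.get("institution") or "").lower()
--         field = (edu.get("field") or "").lower()
--
--         combined = f"{degree} {institution} {field}"
--
--         if any(kw in combined for kw in equivalent_keywords):
--             return True
--
--     return False
-- ===== SOURCE B (Python) =====
-- def _entry_text(edu):
--     degree = (edu.get("degree") or "").lower()
--     institution = (edu.get("institution") or "").lower()
--     field = (edu.get("field") or "").lower()
--     return f"{degree} {institution} {field}"
--
--
-- def _has_equivalent_education(education):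
--     equivalent_keywords = [
--         "associate", "a.s.", "a.a.",
--         "diploma", "certificate",
--         "bootcamp", "coding bootcamp",
--         "professional certificate",
--         "technical degree"
--     ]
--     corpus = "\n".join(_entry_text(edu) for edu in education)
--     return any(kw in corpus for kw in equivalent_keywords)
-- ===== Notes on version B (the rewrite author's own statement) =====
-- stated objective: alternative
-- what changed: Instead of looping over entries with an early return and scanning each entry's combined string for every keyword, B materializes one newline-joined corpus of all per-entry combined strings and does a single substring scan per keyword over it.
import Mathlib
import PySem

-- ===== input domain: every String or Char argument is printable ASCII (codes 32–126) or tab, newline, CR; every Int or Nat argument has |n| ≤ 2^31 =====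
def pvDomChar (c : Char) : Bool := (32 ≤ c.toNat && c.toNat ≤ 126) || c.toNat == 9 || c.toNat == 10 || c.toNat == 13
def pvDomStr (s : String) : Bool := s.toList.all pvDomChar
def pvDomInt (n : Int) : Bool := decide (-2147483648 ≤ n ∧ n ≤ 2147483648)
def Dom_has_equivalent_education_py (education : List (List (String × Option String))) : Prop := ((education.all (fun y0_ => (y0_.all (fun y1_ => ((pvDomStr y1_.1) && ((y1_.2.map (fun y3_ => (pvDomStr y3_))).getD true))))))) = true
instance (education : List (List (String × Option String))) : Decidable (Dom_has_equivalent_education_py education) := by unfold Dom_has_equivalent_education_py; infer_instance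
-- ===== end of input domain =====

-- B replaces A's per-entry scan by building one newline-joined corpus string and scanning it once per keyword (objective: alternative decomposition).

-- the keyword literal list shared by both Pythons
def equivKeywords : List String :=
  ["associate", "a.s.", "a.a.",
   "diploma", "certificate",
   "bootcamp", "coding bootcamp",
   "professional certificate",
   "technical degree"]

-- (edu.get(k) or "")  — None / missing key become ""
def pyGetOrEmpty (edu : List (String × Option String)) (k : String) : String :=
  match PySem.Dict.get? (PySem.Dict.mk edu) k with
  | some (some s) => s
  | _ => ""

-- ===== PORT A =====
def has_equivalent_education_py (education : List (List (String × Option String))) : Bool :=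
  match education with
  | [] => false
  | edu :: rest =>
    let degree := PySem.Str.lower (pyGetOrEmpty edu "degree")
    let institution := PySem.Str.lower (pyGetOrEmpty edu "institution")
    let field := PySem.Str.lower (pyGetOrEmpty edu "field")
    let combined := PySem.Str.join " " [degree, institution, field]
    if equivKeywords.any (fun kw => PySem.Str.isIn kw combined) then true
    else has_equivalent_education_py rest

-- ===== PORT B =====
def entryText (edu : List (String × Option String)) : String :=
  let degree := PySem.Str.lower (pyGetOrEmpty edu "degree")
  let institution := PySem.Str.lower (pyGetOrEmpty edu "institution")
  let field := PySem.Str.lower (pyGetOrEmpty edu "field")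
  PySem.Str.join " " [degree, institution, field]

def has_equivalent_education_py_alt (education : List (List (String × Option String))) : Bool :=
  let corpus := PySem.Str.join "\n" (education.map entryText)
  equivKeywords.any (fun kw => PySem.Str.isIn kw corpus)

-- ===== PRECONDITION & SPEC =====
def Spec_has_equivalent_education_py (education : List (List (String × Option String))) (out : Bool) : Prop := out = has_equivalent_education_py_alt education
instance (education : List (List (String × Option String))) (out : Bool) : Decidable (Spec_has_equivalent_education_py education out) := by unfold Spec_has_equivalent_education_py; infer_instance

-- ===== CLAIM (what is proved, stated in full; the proofs are below) =====
def Claim_equal_has_equivalent_education_py : Prop := ∀ (education : List (List (String × Option String))), Dom_has_equivalent_education_py education → Spec_has_equivalent_education_py education (has_equivalent_education_py education)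

-- ===== LEMMAS AND PROOFS =====

-- a prefix of u ++ x :: v that avoids x is a prefix of u
theorem prefix_of_prefix_append_cons {α : Type} {cs u v : List α} {x : α}
    (hx : x ∉ cs) (h : cs <+: u ++ x :: v) : cs <+: u := by
  induction cs generalizing u with
  | nil => exact List.nil_prefix
  | cons c cs' ih =>
    cases u with
    | nil =>
      rcases List.cons_prefix_cons.mp h with ⟨rfl, _⟩
      exact absurd List.mem_cons_self hx
    | cons a u' =>
      rcases List.cons_prefix_cons.mp h with ⟨rfl, h'⟩
      exact List.cons_prefix_cons.mpr ⟨rfl, ih (fun hm => hx (List.mem_cons_of_mem _ hm)) h'⟩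

-- an infix of u ++ x :: v that avoids x lies in u or in v
theorem infix_append_cons_of_notMem {α : Type} {cs u v : List α} {x : α}
    (hx : x ∉ cs) (h : cs <:+: u ++ x :: v) : cs <:+: u ∨ cs <:+: v := by
  induction u with
  | nil =>
    rcases List.infix_cons_iff.mp h with hp | hi
    · cases cs with
      | nil => exact Or.inl List.nil_infix
      | cons c cs' =>
        rcases List.cons_prefix_cons.mp hp with ⟨rfl, _⟩
        exact absurd List.mem_cons_self hx
    · exact Or.inr hi
  | cons a u' ih =>
    rcases List.infix_cons_iff.mp h with hp | hi
    · exact Or.inl (prefix_of_prefix_append_cons hx hp).isInfix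
    · rcases ih hi with h1 | h2
      · exact Or.inl (h1.trans ⟨[a], [], by simp⟩)
      · exact Or.inr h2

-- a nonempty, newline-free word is an infix of the newline-join iff it is an infix of some line
theorem infix_join_newline_iff (kw : List Char) (hne : kw ≠ []) (hnl : ('\n' : Char) ∉ kw)
    (lines : List (List Char)) :
    kw <:+: PySem.Chars.join ['\n'] lines ↔ ∃ l ∈ lines, kw <:+: l := by
  induction lines with
  | nil =>
    simp only [PySem.Chars.join_nil, List.infix_nil]
    simp [hne]
  | cons l rest ih =>
    cases rest with
    | nil =>
      simp [PySem.Chars.join_singleton]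
    | cons l2 rest' =>
      rw [PySem.Chars.join_cons_cons]
      constructor
      · intro h
        have h' : kw <:+: l ++ '\n' :: PySem.Chars.join ['\n'] (l2 :: rest') := by
          simpa using h
        rcases infix_append_cons_of_notMem hnl h' with h1 | h2
        · exact ⟨l, List.mem_cons_self, h1⟩
        · rcases ih.mp h2 with ⟨m, hm, hkm⟩
          exact ⟨m, List.mem_cons_of_mem _ hm, hkm⟩
      · rintro ⟨m, hm, hkm⟩
        rcases List.mem_cons.mp hm with rfl | hm'
        · exact hkm.trans ⟨[], '\n' :: PySem.Chars.join ['\n'] (l2 :: rest'), by simp⟩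
        · have : kw <:+: PySem.Chars.join ['\n'] (l2 :: rest') := ih.mpr ⟨m, hm', hkm⟩
          exact this.trans ⟨l ++ ['\n'], [], by simp⟩

-- every keyword is nonempty and newline-free
theorem equivKeywords_ok : ∀ kw ∈ equivKeywords, kw.toList ≠ [] ∧ ('\n' : Char) ∉ kw.toList := by
  decide

-- keyword-in-corpus equals keyword-in-some-entry
theorem isIn_corpus_eq (kw : String) (hkw : kw ∈ equivKeywords)
    (education : List (List (String × Option String))) :
    PySem.Str.isIn kw (PySem.Str.join "\n" (education.map entryText))
      = (education.map entryText).any (fun s => PySem.Str.isIn kw s) := by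
  obtain ⟨hne, hnl⟩ := equivKeywords_ok kw hkw
  have hsep : ("\n" : String).toList = ['\n'] := by decide
  rw [PySem.Str.isIn_eq, PySem.Str.toList_join, hsep, Bool.eq_iff_iff,
    PySem.Chars.isIn_iff_infix, infix_join_newline_iff kw.toList hne hnl, List.map_map,
    List.any_eq_true]
  constructor
  · rintro ⟨l, hl, hkl⟩
    obtain ⟨e, he, rfl⟩ := List.mem_map.mp hl
    exact ⟨entryText e, List.mem_map_of_mem he,
      by rw [PySem.Str.isIn_eq]; exact (PySem.Chars.isIn_iff_infix _ _).mpr hkl⟩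
  · rintro ⟨t, ht, hkt⟩
    obtain ⟨e, he, rfl⟩ := List.mem_map.mp ht
    rw [PySem.Str.isIn_eq, PySem.Chars.isIn_iff_infix] at hkt
    exact ⟨(String.toList ∘ entryText) e, List.mem_map_of_mem he, hkt⟩

-- A computed as an `any` over entries
theorem portA_eq_any (education : List (List (String × Option String))) :
    has_equivalent_education_py education
      = education.any (fun edu => equivKeywords.any (fun kw => PySem.Str.isIn kw (entryText edu))) := by
  induction education with
  | nil => rfl
  | cons edu rest ih =>
    simp only [has_equivalent_education_py, entryText, List.any_cons, ih]
    split <;> simp_all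

theorem has_equivalent_education_eq (education : List (List (String × Option String))) :
    has_equivalent_education_py education = has_equivalent_education_py_alt education := by
  rw [portA_eq_any]
  simp only [has_equivalent_education_py_alt]
  rw [Bool.eq_iff_iff]
  simp only [List.any_eq_true]
  constructor
  · rintro ⟨edu, hedu, kw, hkw, hin⟩
    refine ⟨kw, hkw, ?_⟩
    rw [isIn_corpus_eq kw hkw, List.any_eq_true]
    exact ⟨entryText edu, List.mem_map_of_mem hedu, hin⟩
  · rintro ⟨kw, hkw, hin⟩
    rw [isIn_corpus_eq kw hkw, List.any_eq_true] at hin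
    obtain ⟨s, hs, hks⟩ := hin
    obtain ⟨edu, hedu, rfl⟩ := List.mem_map.mp hs
    exact ⟨edu, hedu, kw, hkw, hks⟩

-- ===== VERDICT (by name: the statement is the Claim_ definition above) =====
theorem has_equivalent_education_py_spec : Claim_equal_has_equivalent_education_py := by
  intro education _
  exact has_equivalent_education_eq education
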